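-- pv_equiv track=rewrite | github.com/liupengsay/PyIsTheBestLang | src/dp/matrix_dp/problem.py | lc_2060
-- ===== SOURCE A (Python) =====
-- from functools import lru_cache
-- from itertools import permutations, accumulate
--
-- def lc_2060(s1: str, s2: str) -> bool:
--     """
--     url: https://leetcode.cn/problems/check-if-an-original-string-exists-given-two-encoded-strings/description/
--     tag: matrix_dp|brute_force|memory_search
--     """
--
--     # 二维matrix_dpbrute_forcememory_search
--
--     def check(st):
--         if len(st) == 1:
--             return [int(st)]
--         if len(st) == 2:
--             return [int(st), int(st[0]) + int(st[1])]
--         return [int(st), int(st[:2]) + int(st[2]), int(st[0]) + int(st[1:]), int(st[0]) + int(st[1]) + int(st[2])]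
--
--     def depart(s):
--         k = len(s)
--         i = 0
--         res = []
--         while i < k:
--             if s[i].isnumeric():
--                 cur = ""
--                 while i < k and s[i].isnumeric():
--                     cur += s[i]
--                     i += 1
--                 res.append([str(x) for x in check(cur)])
--             else:
--                 res.append([s[i]])
--                 i += 1
--         post = []
--         for ls in res:
--             post.append(max(int(w) if w.isnumeric() else 1 for w in ls))
--         return res, list(accumulate(post, initial=0))
--
--     lst1, pre1 = depart(s1)
--     lst2, pre2 = depart(s2)
--     m, n = len(lst1), len(lst2)
--
--     @lru_cache(None)
--     def dfs(i, j, x):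
--         if pre2[-1] - pre2[j] < x:
--             return False
--         if pre1[-1] - pre1[i] < -x:
--             return False
--
--         if x == 0:
--             if i == m and j == n:
--                 return True
--             if i == m or j == n:
--                 return False
--             for a in lst1[i]:
--                 for b in lst2[j]:
--                     if a.isnumeric() and b.isnumeric():
--                         if dfs(i + 1, j + 1, int(a) - int(b)):
--                             return True
--                     elif not a.isnumeric() and not b.isnumeric():
--                         if a == b and dfs(i + 1, j + 1, 0):
--                             return True
--                     elif a.isnumeric() and not b.isnumeric():
--                         if dfs(i + 1, j + 1, int(a) - 1):
--                             return True
--                     else: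
--                         if dfs(i + 1, j + 1, 1 - int(b)):
--                             return True
--             return False
--
--         elif x > 0:
--             if j == n:
--                 return False
--             for b in lst2[j]:
--                 if b.isnumeric() and dfs(i, j + 1, x - int(b)):
--                     return True
--                 if not b.isnumeric() and dfs(i, j + 1, x - 1):
--                     return True
--         else:
--             if i == m:
--                 return False
--             for a in lst1[i]:
--                 if a.isnumeric() and dfs(i + 1, j, x + int(a)):
--                     return True
--                 if not a.isnumeric() and dfs(i + 1, j, x + 1):
--                     return True
--         return False
--
--     return dfs(0, 0, 0)
-- ===== SOURCE B (Python) =====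
-- from functools import lru_cache
--
--
-- def lc_2060(s1: str, s2: str) -> bool:
--     # Bottom-up over cells: each digit run becomes the set of totals of its
--     # <=3-digit splittings, and feas(i, j) is the exact set of length
--     # differences from which the suffixes can be completed (no pruning,
--     # no boolean memo over (i, j, x)).
--
--     def run_sums(run):
--         # all totals of splitting `run` into pieces of at most three digits
--         acc = {len(run): frozenset([0])}
--         for p in range(len(run) - 1, -1, -1):
--             vals = set()
--             for l in (1, 2, 3):
--                 if p + l <= len(run):
--                     v = int(run[p:p + l])
--                     vals |= {v + t for t in acc[p + l]}
--             acc[p] = frozenset(vals)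
--         return acc[0]
--
--     def parse(s):
--         cells = []
--         i, k = 0, len(s)
--         while i < k:
--             if s[i].isdigit():
--                 j = i
--                 while j < k and s[j].isdigit():
--                     j += 1
--                 cells.append(("num", run_sums(s[i:j])))
--                 i = j
--             else:
--                 cells.append(("ch", s[i]))
--                 i += 1
--         return cells
--
--     c1, c2 = parse(s1), parse(s2)
--     m, n = len(c1), len(c2)
--
--     @lru_cache(None)
--     def feas(i, j):
--         # exact set of diffs x (s1 ahead of s2 by x letters) from which the
--         # cell suffixes c1[i:], c2[j:] can both be completed
--         res = set()
--         if i == m and j == n: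
--             res.add(0)
--         if j < n:
--             later = feas(i, j + 1)
--             steps = c2[j][1] if c2[j][0] == "num" else frozenset([1])
--             res |= {b + t for b in steps for t in later if b + t > 0}
--         if i < m:
--             later = feas(i + 1, j)
--             steps = c1[i][1] if c1[i][0] == "num" else frozenset([1])
--             res |= {t - a for a in steps for t in later if t - a < 0}
--         if i < m and j < n:
--             later = feas(i + 1, j + 1)
--             k1, v1 = c1[i]
--             k2, v2 = c2[j]
--             if k1 == "num" and k2 == "num":
--                 if any(a - b in later for a in v1 for b in v2):
--                     res.add(0)
--             elif k1 == "num":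
--                 if any(a - 1 in later for a in v1):
--                     res.add(0)
--             elif k2 == "num":
--                 if any(1 - b in later for b in v2):
--                     res.add(0)
--             else:
--                 if v1 == v2 and 0 in later:
--                     res.add(0)
--         return frozenset(res)
--
--     return 0 in feas(0, 0)
-- ===== Notes on version B (the rewrite author's own statement) =====
-- stated objective: alternative
-- what changed: Replaces A's depart/check string preprocessing plus pruned boolean memo-dfs over states (i, j, x) by a bottom-up set-valued DP: each digit run becomes the set of totals of its <=3-digit splittings and feas(i, j) is computed once per cell pair as the exact set of feasible length differences (no pruning arrays, no str/int round-trips); B trades A's capacity pruning for exhaustive diff sets, so it is slower on digit-heavy inputs.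
-- outside the precondition, e.g. on lc_2060('1234', '6'): A returns True, B returns False
import Mathlib
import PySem

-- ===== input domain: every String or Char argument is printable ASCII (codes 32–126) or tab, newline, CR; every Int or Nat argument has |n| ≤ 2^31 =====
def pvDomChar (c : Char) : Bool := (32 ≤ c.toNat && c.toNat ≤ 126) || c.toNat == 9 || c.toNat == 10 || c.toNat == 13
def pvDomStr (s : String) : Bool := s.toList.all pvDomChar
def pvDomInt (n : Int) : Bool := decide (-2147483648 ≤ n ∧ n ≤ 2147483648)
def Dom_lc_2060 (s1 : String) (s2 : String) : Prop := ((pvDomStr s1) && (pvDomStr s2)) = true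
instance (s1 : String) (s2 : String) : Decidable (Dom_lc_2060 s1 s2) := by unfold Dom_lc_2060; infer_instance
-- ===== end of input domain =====

-- B replaces A's depart/check preprocessing and pruned boolean memo-dfs over (i, j, x) by a
-- bottom-up set-valued DP: each digit run becomes the set of totals of its ≤3-digit splittings
-- and feas(i, j) is computed once as the exact set of feasible length differences (alternative
-- decomposition, similar cost; no speed claim).

-- ===== PORT A =====

-- int(cs): never raises on the digit strings A feeds it, so the total getD form is exact here
def pvInt (cs : List Char) : Int := (PySem.Int.ofChars? cs).getD 0

-- int(st[i]) for an in-range index i: the one-character string st[i]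
def pvCharStr (st : List Char) (i : Int) : List Char :=
  match PySem.List.pyGet? st i with
  | some c => [c]
  | none => []

def pvCheck (st : List Char) : List Int :=
  if st.length = 1 then [pvInt st]
  else if st.length = 2 then
    [pvInt st, pvInt (pvCharStr st 0) + pvInt (pvCharStr st 1)]
  else
    [pvInt st,
     pvInt (PySem.List.slice st none (some 2)) + pvInt (pvCharStr st 2),
     pvInt (pvCharStr st 0) + pvInt (PySem.List.slice st (some 1) none),
     pvInt (pvCharStr st 0) + pvInt (pvCharStr st 1) + pvInt (pvCharStr st 2)]

-- depart's outer while loop (index i) as recursion on the remaining characters; the inner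
-- while collecting the maximal digit run is takeWhile/dropWhile.  s[i].isnumeric() is ported
-- as the ASCII digit test, exact on the printable-ASCII domain Dom_lc_2060.
def pvDepartCells (s : List Char) : List (List (List Char)) :=
  match s with
  | [] => []
  | c :: rest =>
    if PySem.Chars.isdigit c then
      ((pvCheck ((c :: rest).takeWhile PySem.Chars.isdigit)).map PySem.Int.toChars)
        :: pvDepartCells ((c :: rest).dropWhile PySem.Chars.isdigit)
    else [[c]] :: pvDepartCells rest
  termination_by s.length
  decreasing_by
    · have h := List.length_dropWhile_le PySem.Chars.isdigit rest
      simp [*]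
      try omega
    · simp

-- max(int(w) if w.isnumeric() else 1 for w in ls): the generator is nonempty (cells are), so
-- the total getD form of max is exact
def pvPostVal (ls : List (List Char)) : Int :=
  (PySem.List.max? (ls.map (fun w => if PySem.Chars.strIsdigit w then pvInt w else 1))
    (fun v => v)).getD 0

def pvPost (cells : List (List (List Char))) : List Int := cells.map pvPostVal

-- list(accumulate(post, initial=0))
def pvAccum (l : List Int) : List Int := List.scanl (· + ·) 0 l

-- dfs(i, j, x) with fuel (the memoised recursion always terminates: i + j grows at every call,
-- so fuel m + n + 1 at the root is never exhausted)
def pvDfsA (lst1 lst2 : List (List (List Char))) (pre1 pre2 : List Int) (m n : Nat) :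
    Nat → Nat → Nat → Int → Bool
  | 0, _, _, _ => false
  | fuel+1, i, j, x =>
    if pre2.getLast?.getD 0 - pre2.getD j 0 < x then false
    else if pre1.getLast?.getD 0 - pre1.getD i 0 < -x then false
    else if x = 0 then
      if i = m ∧ j = n then true
      else if i = m ∨ j = n then false
      else
        (lst1.getD i []).any fun a =>
          (lst2.getD j []).any fun b =>
            if PySem.Chars.strIsdigit a && PySem.Chars.strIsdigit b then
              pvDfsA lst1 lst2 pre1 pre2 m n fuel (i+1) (j+1) (pvInt a - pvInt b)
            else if !PySem.Chars.strIsdigit a && !PySem.Chars.strIsdigit b then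
              a == b && pvDfsA lst1 lst2 pre1 pre2 m n fuel (i+1) (j+1) 0
            else if PySem.Chars.strIsdigit a && !PySem.Chars.strIsdigit b then
              pvDfsA lst1 lst2 pre1 pre2 m n fuel (i+1) (j+1) (pvInt a - 1)
            else
              pvDfsA lst1 lst2 pre1 pre2 m n fuel (i+1) (j+1) (1 - pvInt b)
    else if 0 < x then
      if j = n then false
      else (lst2.getD j []).any fun b =>
        (PySem.Chars.strIsdigit b && pvDfsA lst1 lst2 pre1 pre2 m n fuel i (j+1) (x - pvInt b)) ||
        (!PySem.Chars.strIsdigit b && pvDfsA lst1 lst2 pre1 pre2 m n fuel i (j+1) (x - 1))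
    else
      if i = m then false
      else (lst1.getD i []).any fun a =>
        (PySem.Chars.strIsdigit a && pvDfsA lst1 lst2 pre1 pre2 m n fuel (i+1) j (x + pvInt a)) ||
        (!PySem.Chars.strIsdigit a && pvDfsA lst1 lst2 pre1 pre2 m n fuel (i+1) j (x + 1))

def lc_2060 (s1 : String) (s2 : String) : Bool :=
  let lst1 := pvDepartCells s1.toList
  let lst2 := pvDepartCells s2.toList
  let pre1 := pvAccum (pvPost lst1)
  let pre2 := pvAccum (pvPost lst2)
  pvDfsA lst1 lst2 pre1 pre2 lst1.length lst2.length (lst1.length + lst2.length + 1) 0 0 0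

-- ===== PORT B =====

-- run_sums: all totals of splitting the run into pieces of at most three digits
-- (int(run[p:p+l]) is int of a nonnegative slice, ported as take/drop)
def pvRunSums (run : List Char) : PySem.Set Int :=
  match run with
  | [] => PySem.Set.ofList [0]
  | c :: rest =>
    let s1 := PySem.Set.update PySem.Set.empty
      (((pvRunSums rest) : List Int).map (fun t => pvInt ((c :: rest).take 1) + t))
    let s2 := if 1 ≤ rest.length then
        PySem.Set.update s1
          (((pvRunSums (rest.drop 1)) : List Int).map (fun t => pvInt ((c :: rest).take 2) + t))
      else s1
    if 2 ≤ rest.length then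
      PySem.Set.update s2
        (((pvRunSums (rest.drop 2)) : List Int).map (fun t => pvInt ((c :: rest).take 3) + t))
    else s2
  termination_by run.length
  decreasing_by all_goals (simp only [List.length_drop, List.length_cons]; try omega)

-- parse: the same scan as A's depart, but cells carry the run's splitting totals
def pvCellsB (s : List Char) : List (Char ⊕ PySem.Set Int) :=
  match s with
  | [] => []
  | c :: rest =>
    if PySem.Chars.isdigit c then
      Sum.inr (pvRunSums ((c :: rest).takeWhile PySem.Chars.isdigit))
        :: pvCellsB ((c :: rest).dropWhile PySem.Chars.isdigit)
    else Sum.inl c :: pvCellsB rest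
  termination_by s.length
  decreasing_by
    · have h := List.length_dropWhile_le PySem.Chars.isdigit rest
      simp [*]
      try omega
    · simp

def pvSteps (cell : Char ⊕ PySem.Set Int) : List Int :=
  match cell with
  | Sum.inr vs => vs
  | Sum.inl _ => [1]

-- {b + t for b in steps for t in later if b + t > 0}
def pvPosPart (steps : List Int) (later : List Int) : List Int :=
  steps.flatMap (fun b => (later.filter (fun t => decide (0 < b + t))).map (fun t => b + t))

-- {t - a for a in steps for t in later if t - a < 0}
def pvNegPart (steps : List Int) (later : List Int) : List Int :=
  steps.flatMap (fun a => (later.filter (fun t => decide (t - a < 0))).map (fun t => t - a))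

def pvPairOk (c1 c2 : Char ⊕ PySem.Set Int) (later : PySem.Set Int) : Bool :=
  match c1, c2 with
  | Sum.inr v1, Sum.inr v2 =>
    (v1 : List Int).any (fun a => (v2 : List Int).any (fun b => later.contains (a - b)))
  | Sum.inr v1, Sum.inl _ => (v1 : List Int).any (fun a => later.contains (a - 1))
  | Sum.inl _, Sum.inr v2 => (v2 : List Int).any (fun b => later.contains (1 - b))
  | Sum.inl a, Sum.inl b => a == b && later.contains 0

-- feas(i, j) over the cell suffixes: the set of feasible length differences
def pvFeas : List (Char ⊕ PySem.Set Int) → List (Char ⊕ PySem.Set Int) → PySem.Set Int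
  | [], [] => PySem.Set.add PySem.Set.empty 0
  | [], c2 :: t2 => PySem.Set.update PySem.Set.empty (pvPosPart (pvSteps c2) (pvFeas [] t2))
  | c1 :: t1, [] => PySem.Set.update PySem.Set.empty (pvNegPart (pvSteps c1) (pvFeas t1 []))
  | c1 :: t1, c2 :: t2 =>
    let res1 := PySem.Set.update PySem.Set.empty (pvPosPart (pvSteps c2) (pvFeas (c1 :: t1) t2))
    let res2 := PySem.Set.update res1 (pvNegPart (pvSteps c1) (pvFeas t1 (c2 :: t2)))
    if pvPairOk c1 c2 (pvFeas t1 t2) then PySem.Set.add res2 0 else res2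
  termination_by r1 r2 => r1.length + r2.length
  decreasing_by all_goals (simp; try omega)

def lc_2060_alt (s1 : String) (s2 : String) : Bool :=
  (pvFeas (pvCellsB s1.toList) (pvCellsB s2.toList)).contains 0

-- ===== PRECONDITION & SPEC =====

-- no four consecutive digit characters anywhere in the string
def pvRunsLe3 : List Char → Bool
  | a :: b :: c :: d :: t =>
    !(PySem.Chars.isdigit a && PySem.Chars.isdigit b && PySem.Chars.isdigit c
        && PySem.Chars.isdigit d) && pvRunsLe3 (b :: c :: d :: t)
  | _ => true

-- Pre_ excludes strings with a digit run longer than 3 characters, outside the problem's stated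
-- constraint, where A's check enumerates ill-formed splits (oversized pieces, dropped digits).
def Pre_lc_2060 (s1 : String) (s2 : String) : Prop :=
  pvRunsLe3 s1.toList = true ∧ pvRunsLe3 s2.toList = true
instance (s1 : String) (s2 : String) : Decidable (Pre_lc_2060 s1 s2) := by
  unfold Pre_lc_2060; infer_instance

def pvWitness_lc_2060 : String × String := ("a12", "3a")

def Spec_lc_2060 (s1 : String) (s2 : String) (out : Bool) : Prop := out = lc_2060_alt s1 s2
instance (s1 : String) (s2 : String) (out : Bool) : Decidable (Spec_lc_2060 s1 s2 out) := by
  unfold Spec_lc_2060; infer_instance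

-- ===== CLAIM (what is proved, stated in full; the proofs are below) =====
def Claim_equal_lc_2060 : Prop := ∀ (s1 : String) (s2 : String), Dom_lc_2060 s1 s2 → Pre_lc_2060 s1 s2 → Spec_lc_2060 s1 s2 (lc_2060 s1 s2)

-- ===== LEMMAS AND PROOFS =====

-- the relation between an A-cell (list of digit strings / one-letter string) and a B-cell
def CellRel (la : List (List Char)) (cb : Char ⊕ PySem.Set Int) : Prop :=
  (∃ c, PySem.Chars.isdigit c = false ∧ la = [[c]] ∧ cb = Sum.inl c) ∨
  (∃ W vs S, la = (W :: vs).map PySem.Int.toChars ∧ cb = Sum.inr S ∧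
    (∀ v ∈ W :: vs, 0 ≤ v ∧ v ≤ W) ∧ W ≤ 999 ∧ (∀ v : Int, v ∈ S ↔ v ∈ W :: vs))

set_option maxRecDepth 1000000 in
theorem pv_tab1 : ∀ x < 10, PySem.Int.ofChars? [Char.ofNat (48+x)] = some (x : Int) := by decide

set_option maxRecDepth 1000000 in
theorem pv_tab2 : ∀ x < 10, ∀ y < 10,
    PySem.Int.ofChars? [Char.ofNat (48+x), Char.ofNat (48+y)] = some (10*(x : Int) + y) := by decide

set_option maxRecDepth 1000000 in
theorem pv_tab3 : ∀ x < 10, ∀ y < 10, ∀ z < 10,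
    PySem.Int.ofChars? [Char.ofNat (48+x), Char.ofNat (48+y), Char.ofNat (48+z)] =
      some (100*(x : Int) + 10*y + z) := by decide

set_option maxRecDepth 1000000 in
theorem pv_tabRT : ∀ v < 1000, PySem.Chars.strIsdigit (PySem.Int.toChars (v : Nat)) = true ∧
    PySem.Int.ofChars? (PySem.Int.toChars (v : Nat)) = some v := by decide

theorem pv_isdigit_iff (c : Char) : PySem.Chars.isdigit c = true ↔ 48 ≤ c.toNat ∧ c.toNat ≤ 57 := by
  show ((decide ('0' ≤ c) && decide (c ≤ '9')) = true) ↔ _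
  rw [Bool.and_eq_true, decide_eq_true_iff, decide_eq_true_iff]
  constructor
  · rintro ⟨h1, h2⟩
    exact ⟨UInt32.le_iff_toNat_le.mp h1, UInt32.le_iff_toNat_le.mp h2⟩
  · rintro ⟨h1, h2⟩
    exact ⟨UInt32.le_iff_toNat_le.mpr h1, UInt32.le_iff_toNat_le.mpr h2⟩

theorem pv_digit_eval1 (a : Char) (ha : PySem.Chars.isdigit a = true) :
    PySem.Int.ofChars? [a] = some ((a.toNat : Int) - 48) := by
  rw [pv_isdigit_iff] at ha
  have h1 : a = Char.ofNat (48 + (a.toNat - 48)) := by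
    rw [show 48 + (a.toNat - 48) = a.toNat by omega, Char.ofNat_toNat]
  rw [h1, pv_tab1 _ (by omega), ← h1]
  congr 1
  omega

theorem pv_digit_eval2 (a b : Char) (ha : PySem.Chars.isdigit a = true)
    (hb : PySem.Chars.isdigit b = true) :
    PySem.Int.ofChars? [a, b] = some (10 * ((a.toNat : Int) - 48) + ((b.toNat : Int) - 48)) := by
  rw [pv_isdigit_iff] at ha hb
  have h1 : a = Char.ofNat (48 + (a.toNat - 48)) := by
    rw [show 48 + (a.toNat - 48) = a.toNat by omega, Char.ofNat_toNat]
  have h2 : b = Char.ofNat (48 + (b.toNat - 48)) := by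
    rw [show 48 + (b.toNat - 48) = b.toNat by omega, Char.ofNat_toNat]
  rw [h1, h2, pv_tab2 _ (by omega) _ (by omega), ← h1, ← h2]
  congr 1
  omega

theorem pv_digit_eval3 (a b c : Char) (ha : PySem.Chars.isdigit a = true)
    (hb : PySem.Chars.isdigit b = true) (hc : PySem.Chars.isdigit c = true) :
    PySem.Int.ofChars? [a, b, c] =
      some (100 * ((a.toNat : Int) - 48) + 10 * ((b.toNat : Int) - 48) + ((c.toNat : Int) - 48)) := by
  rw [pv_isdigit_iff] at ha hb hc
  have h1 : a = Char.ofNat (48 + (a.toNat - 48)) := by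
    rw [show 48 + (a.toNat - 48) = a.toNat by omega, Char.ofNat_toNat]
  have h2 : b = Char.ofNat (48 + (b.toNat - 48)) := by
    rw [show 48 + (b.toNat - 48) = b.toNat by omega, Char.ofNat_toNat]
  have h3 : c = Char.ofNat (48 + (c.toNat - 48)) := by
    rw [show 48 + (c.toNat - 48) = c.toNat by omega, Char.ofNat_toNat]
  rw [h1, h2, h3, pv_tab3 _ (by omega) _ (by omega) _ (by omega), ← h1, ← h2, ← h3]
  congr 1
  omega

theorem pv_roundtrip (v : Int) (h0 : 0 ≤ v) (h1 : v ≤ 999) :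
    PySem.Chars.strIsdigit (PySem.Int.toChars v) = true ∧
      PySem.Int.ofChars? (PySem.Int.toChars v) = some v := by
  have hv : v = ((v.toNat : Nat) : Int) := by omega
  rw [hv]
  exact pv_tabRT v.toNat (by omega)

theorem pv_runsLe3_tail (x : Char) (xs : List Char) (h : pvRunsLe3 (x :: xs) = true) :
    pvRunsLe3 xs = true := by
  match xs with
  | [] => rfl
  | [_] => rfl
  | [_, _] => rfl
  | b :: c :: d :: t =>
    rw [pvRunsLe3, Bool.and_eq_true] at h
    exact h.2

theorem pv_runsLe3_dropWhile (s : List Char) (h : pvRunsLe3 s = true) :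
    pvRunsLe3 (s.dropWhile PySem.Chars.isdigit) = true := by
  induction s with
  | nil => exact h
  | cons c rest ih =>
    rw [List.dropWhile_cons]
    split
    · exact ih (pv_runsLe3_tail c rest h)
    · exact h

theorem pv_takeWhile_len (s : List Char) (h : pvRunsLe3 s = true) :
    (s.takeWhile PySem.Chars.isdigit).length ≤ 3 := by
  match s with
  | [] => simp
  | [a] =>
    have := (List.takeWhile_prefix (l := [a]) PySem.Chars.isdigit).length_le
    simp at this
    omega
  | [a, b] =>
    have := (List.takeWhile_prefix (l := [a, b]) PySem.Chars.isdigit).length_le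
    simp at this
    omega
  | [a, b, c] =>
    have := (List.takeWhile_prefix (l := [a, b, c]) PySem.Chars.isdigit).length_le
    simp at this
    omega
  | a :: b :: c :: d :: t =>
    rw [pvRunsLe3, Bool.and_eq_true] at h
    by_cases h1 : PySem.Chars.isdigit a <;> by_cases h2 : PySem.Chars.isdigit b <;>
      by_cases h3 : PySem.Chars.isdigit c <;> by_cases h4 : PySem.Chars.isdigit d <;>
      simp [List.takeWhile_cons, h1, h2, h3, h4] at h ⊢

theorem pv_mem_runSums_nil (v : Int) : v ∈ pvRunSums [] ↔ v = 0 := by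
  rw [pvRunSums]
  simp [PySem.Set.mem_ofList]

theorem pv_mem_runSums1 (a : Char) (v : Int) : v ∈ pvRunSums [a] ↔ v = pvInt [a] := by
  rw [pvRunSums]
  norm_num
  simp [pv_mem_runSums_nil]
  omega

theorem pv_mem_runSums2 (a b : Char) (v : Int) :
    v ∈ pvRunSums [a, b] ↔ v = pvInt [a] + pvInt [b] ∨ v = pvInt [a, b] := by
  rw [pvRunSums]
  norm_num
  simp [pv_mem_runSums1, pv_mem_runSums_nil]
  omega

theorem pv_mem_runSums3 (a b c : Char) (v : Int) :
    v ∈ pvRunSums [a, b, c] ↔ v = pvInt [a] + (pvInt [b] + pvInt [c]) ∨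
      v = pvInt [a] + pvInt [b, c] ∨ v = pvInt [a, b] + pvInt [c] ∨ v = pvInt [a, b, c] := by
  rw [pvRunSums]
  norm_num
  simp [pv_mem_runSums2, pv_mem_runSums1, pv_mem_runSums_nil]
  omega

theorem pv_run_rel (run : List Char) (hne : run ≠ []) (hlen : run.length ≤ 3)
    (hdig : ∀ c ∈ run, PySem.Chars.isdigit c = true) :
    CellRel ((pvCheck run).map PySem.Int.toChars) (Sum.inr (pvRunSums run)) := by
  match run with
  | [] => exact absurd rfl hne
  | [a] =>
    have ha := hdig a (by simp)
    have hba := (pv_isdigit_iff a).mp ha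
    have e1 : pvInt [a] = (a.toNat : Int) - 48 := by rw [pvInt, pv_digit_eval1 a ha]; rfl
    have hch : pvCheck [a] = [pvInt [a]] := by simp [pvCheck]
    refine Or.inr ⟨pvInt [a], [], pvRunSums [a], by rw [hch], rfl, ?_, ?_, ?_⟩
    · intro v hv
      simp only [List.mem_singleton] at hv
      subst hv
      rw [e1]
      omega
    · rw [e1]; omega
    · intro v
      rw [pv_mem_runSums1]
      simp only [List.mem_singleton]
  | [a, b] =>
    have ha := hdig a (by simp)
    have hb := hdig b (by simp)
    have hba := (pv_isdigit_iff a).mp ha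
    have hbb := (pv_isdigit_iff b).mp hb
    have e1 : pvInt [a] = (a.toNat : Int) - 48 := by rw [pvInt, pv_digit_eval1 a ha]; rfl
    have e1b : pvInt [b] = (b.toNat : Int) - 48 := by rw [pvInt, pv_digit_eval1 b hb]; rfl
    have e2 : pvInt [a, b] = 10 * ((a.toNat : Int) - 48) + ((b.toNat : Int) - 48) := by
      rw [pvInt, pv_digit_eval2 a b ha hb]; rfl
    have hch : pvCheck [a, b] = [pvInt [a, b], pvInt [a] + pvInt [b]] := by
      simp [pvCheck, pvCharStr, PySem.List.pyGet?, PySem.List.pyIdx?]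
    refine Or.inr ⟨pvInt [a, b], [pvInt [a] + pvInt [b]], pvRunSums [a, b],
      by rw [hch], rfl, ?_, ?_, ?_⟩
    · intro v hv
      simp only [List.mem_cons, List.not_mem_nil, or_false] at hv
      rw [e2]
      simp only [e1, e1b, e2] at hv
      omega
    · rw [e2]; omega
    · intro v
      rw [pv_mem_runSums2]
      simp only [List.mem_cons, List.not_mem_nil, or_false]
      omega
  | [a, b, c] =>
    have ha := hdig a (by simp)
    have hb := hdig b (by simp)
    have hc := hdig c (by simp)
    have hba := (pv_isdigit_iff a).mp ha
    have hbb := (pv_isdigit_iff b).mp hb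
    have hbc := (pv_isdigit_iff c).mp hc
    have e1a : pvInt [a] = (a.toNat : Int) - 48 := by rw [pvInt, pv_digit_eval1 a ha]; rfl
    have e1b : pvInt [b] = (b.toNat : Int) - 48 := by rw [pvInt, pv_digit_eval1 b hb]; rfl
    have e1c : pvInt [c] = (c.toNat : Int) - 48 := by rw [pvInt, pv_digit_eval1 c hc]; rfl
    have e2ab : pvInt [a, b] = 10 * ((a.toNat : Int) - 48) + ((b.toNat : Int) - 48) := by
      rw [pvInt, pv_digit_eval2 a b ha hb]; rfl
    have e2bc : pvInt [b, c] = 10 * ((b.toNat : Int) - 48) + ((c.toNat : Int) - 48) := by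
      rw [pvInt, pv_digit_eval2 b c hb hc]; rfl
    have e3 : pvInt [a, b, c] = 100 * ((a.toNat : Int) - 48) + 10 * ((b.toNat : Int) - 48)
        + ((c.toNat : Int) - 48) := by
      rw [pvInt, pv_digit_eval3 a b c ha hb hc]; rfl
    have hch : pvCheck [a, b, c] =
        [pvInt [a, b, c], pvInt [a, b] + pvInt [c], pvInt [a] + pvInt [b, c],
         pvInt [a] + pvInt [b] + pvInt [c]] := by
      have hs1 : PySem.List.slice [a, b, c] none (some 2) = [a, b] := by
        rw [PySem.List.slice_to _ (by omega)]; rfl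
      have hs2 : PySem.List.slice [a, b, c] (some 1) none = [b, c] := by
        rw [PySem.List.slice_from _ (by omega)]; rfl
      simp [pvCheck, pvCharStr, PySem.List.pyGet?, PySem.List.pyIdx?, hs1, hs2]
    refine Or.inr ⟨pvInt [a, b, c],
      [pvInt [a, b] + pvInt [c], pvInt [a] + pvInt [b, c], pvInt [a] + pvInt [b] + pvInt [c]],
      pvRunSums [a, b, c], by rw [hch], rfl, ?_, ?_, ?_⟩
    · intro v hv
      simp only [List.mem_cons, List.not_mem_nil, or_false] at hv
      rw [e3]
      simp only [e1a, e1b, e1c, e2ab, e2bc, e3] at hv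
      omega
    · rw [e3]; omega
    · intro v
      rw [pv_mem_runSums3]
      simp only [List.mem_cons, List.not_mem_nil, or_false]
      omega
  | _ :: _ :: _ :: _ :: _ =>
    simp at hlen
    omega

theorem pv_parse_rel (s : List Char) (h : pvRunsLe3 s = true) :
    List.Forall₂ CellRel (pvDepartCells s) (pvCellsB s) := by
  match s with
  | [] =>
    rw [pvDepartCells, pvCellsB]
    exact List.Forall₂.nil
  | c :: rest =>
    rw [pvDepartCells, pvCellsB]
    by_cases hd : PySem.Chars.isdigit c
    · rw [if_pos hd, if_pos hd]
      refine List.Forall₂.cons ?_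
        (pv_parse_rel ((c :: rest).dropWhile PySem.Chars.isdigit)
          (pv_runsLe3_dropWhile _ h))
      apply pv_run_rel
      · rw [List.takeWhile_cons_of_pos hd]
        simp
      · exact pv_takeWhile_len _ h
      · exact fun x hx => List.mem_takeWhile_imp hx
    · rw [if_neg hd, if_neg hd]
      exact List.Forall₂.cons (Or.inl ⟨c, by simpa using hd, rfl, rfl⟩)
        (pv_parse_rel rest (pv_runsLe3_tail _ _ h))
  termination_by s.length
  decreasing_by
    all_goals simp [*]
    all_goals (have h' := List.length_dropWhile_le PySem.Chars.isdigit rest; omega)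

theorem pv_foldl_max_eq (W : Int) (vs : List Int) (h : ∀ v ∈ vs, v ≤ W) :
    List.foldl max W vs = W := by
  induction vs generalizing W with
  | nil => rfl
  | cons a t ih =>
    simp only [List.foldl_cons]
    rw [max_eq_left (h a (by simp))]
    exact ih W (fun v hv => h v (by simp [hv]))

theorem pv_postVal_letter (c : Char) (hc : PySem.Chars.isdigit c = false) :
    pvPostVal [[c]] = 1 := by
  unfold pvPostVal
  have : PySem.Chars.strIsdigit [c] = PySem.Chars.isdigit c := by
    simp [PySem.Chars.strIsdigit]
  simp [this, hc, PySem.List.max?]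

theorem pv_postVal_run (W : Int) (vs : List Int) (hb : ∀ v ∈ W :: vs, 0 ≤ v ∧ v ≤ W)
    (hW : W ≤ 999) :
    pvPostVal ((W :: vs).map PySem.Int.toChars) = W := by
  unfold pvPostVal
  have hmap : ((W :: vs).map PySem.Int.toChars).map
      (fun w => if PySem.Chars.strIsdigit w then pvInt w else 1) = W :: vs := by
    rw [List.map_map]
    have : ∀ v ∈ W :: vs,
        (if PySem.Chars.strIsdigit (PySem.Int.toChars v) then pvInt (PySem.Int.toChars v) else 1)
          = v := by
      intro v hv
      obtain ⟨h0, hle⟩ := hb v hv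
      obtain ⟨hd, hof⟩ := pv_roundtrip v h0 (by omega)
      simp [hd, pvInt, hof]
    simp only [Function.comp_def]
    rw [List.map_congr_left this]
    simp
  rw [hmap, PySem.List.max?_id_cons, pv_foldl_max_eq W vs (fun v hv => (hb v (by simp [hv])).2)]
  rfl

theorem pv_cell_cap (la : List (List Char)) (cb : Char ⊕ PySem.Set Int) (h : CellRel la cb) :
    0 ≤ pvPostVal la ∧ ∀ b ∈ pvSteps cb, b ≤ pvPostVal la := by
  rcases h with ⟨c, hc, rfl, rfl⟩ | ⟨W, vs, S, rfl, rfl, hb, hW, hmem⟩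
  · rw [pv_postVal_letter c hc]
    refine ⟨by omega, ?_⟩
    intro b hbmem
    simp only [pvSteps, List.mem_singleton] at hbmem
    omega
  · rw [pv_postVal_run W vs hb hW]
    refine ⟨(hb W (by simp)).1, ?_⟩
    intro b hbmem
    exact (hb b ((hmem b).mp hbmem)).2

theorem pv_scanl_getD (l : List Int) (b : Int) (j : Nat) :
    j ≤ l.length → (List.scanl (· + ·) b l).getD j 0 = b + (l.take j).sum := by
  induction l generalizing b j with
  | nil =>
    intro hj
    have : j = 0 := by simpa using hj
    subst this
    simp
  | cons a t ih =>
    intro hj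
    rw [List.scanl_cons]
    match j with
    | 0 => simp
    | j + 1 =>
      simp only [List.getD_cons_succ, List.take_succ_cons, List.sum_cons]
      rw [ih (b + a) j (by simpa using hj)]
      ring


theorem pv_accum_getD (l : List Int) (j : Nat) (hj : j ≤ l.length) :
    (pvAccum l).getLast?.getD 0 - (pvAccum l).getD j 0 = (l.drop j).sum := by
  unfold pvAccum
  have hlen : (List.scanl (· + ·) (0 : Int) l).length = l.length + 1 := by
    simp [List.length_scanl]
  have hlast : (List.scanl (· + ·) (0 : Int) l).getLast?.getD 0 = l.sum := by
    rw [List.getLast?_eq_getElem?, hlen]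
    have := pv_scanl_getD l 0 l.length (le_refl _)
    simp only [List.getD_eq_getElem?_getD] at this
    simpa using this
  rw [hlast, pv_scanl_getD l 0 j hj]
  have := List.sum_take_add_sum_drop l j
  omega

theorem pv_mem_posPart (steps later : List Int) (x : Int) :
    x ∈ pvPosPart steps later ↔ ∃ b ∈ steps, ∃ t ∈ later, x = b + t ∧ 0 < x := by
  unfold pvPosPart
  simp only [List.mem_flatMap, List.mem_map, List.mem_filter, decide_eq_true_eq]
  constructor
  · rintro ⟨b, hb, t, ⟨ht, hpos⟩, rfl⟩
    exact ⟨b, hb, t, ht, rfl, hpos⟩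
  · rintro ⟨b, hb, t, ht, rfl, hpos⟩
    exact ⟨b, hb, t, ⟨ht, hpos⟩, rfl⟩

theorem pv_mem_negPart (steps later : List Int) (x : Int) :
    x ∈ pvNegPart steps later ↔ ∃ a ∈ steps, ∃ t ∈ later, x = t - a ∧ x < 0 := by
  unfold pvNegPart
  simp only [List.mem_flatMap, List.mem_map, List.mem_filter, decide_eq_true_eq]
  constructor
  · rintro ⟨a, ha, t, ⟨ht, hneg⟩, rfl⟩
    exact ⟨a, ha, t, ht, rfl, hneg⟩
  · rintro ⟨a, ha, t, ht, rfl, hneg⟩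
    exact ⟨a, ha, t, ⟨ht, hneg⟩, rfl⟩

theorem pv_mem_feas_nil_nil (x : Int) : x ∈ pvFeas [] [] ↔ x = 0 := by
  rw [pvFeas]
  simp [PySem.Set.empty_eq]

theorem pv_mem_feas_nil_cons (c2 : Char ⊕ PySem.Set Int) (t2 : List (Char ⊕ PySem.Set Int))
    (x : Int) :
    x ∈ pvFeas [] (c2 :: t2) ↔ ∃ b ∈ pvSteps c2, ∃ t ∈ pvFeas [] t2, x = b + t ∧ 0 < x := by
  rw [pvFeas]
  rw [show (PySem.Set.update PySem.Set.empty (pvPosPart (pvSteps c2) (pvFeas [] t2)) : List Int)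
      = PySem.Set.update PySem.Set.empty (pvPosPart (pvSteps c2) (pvFeas [] t2)) from rfl]
  rw [PySem.Set.mem_update, PySem.Set.empty_eq]
  simp only [List.not_mem_nil, false_or]
  exact pv_mem_posPart _ _ _

theorem pv_mem_feas_cons_nil (c1 : Char ⊕ PySem.Set Int) (t1 : List (Char ⊕ PySem.Set Int))
    (x : Int) :
    x ∈ pvFeas (c1 :: t1) [] ↔ ∃ a ∈ pvSteps c1, ∃ t ∈ pvFeas t1 [], x = t - a ∧ x < 0 := by
  rw [pvFeas, PySem.Set.mem_update, PySem.Set.empty_eq]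
  simp only [List.not_mem_nil, false_or]
  exact pv_mem_negPart _ _ _

theorem pv_mem_feas_cons_cons (c1 c2 : Char ⊕ PySem.Set Int)
    (t1 t2 : List (Char ⊕ PySem.Set Int)) (x : Int) :
    x ∈ pvFeas (c1 :: t1) (c2 :: t2) ↔
      (∃ b ∈ pvSteps c2, ∃ t ∈ pvFeas (c1 :: t1) t2, x = b + t ∧ 0 < x) ∨
      (∃ a ∈ pvSteps c1, ∃ t ∈ pvFeas t1 (c2 :: t2), x = t - a ∧ x < 0) ∨
      (x = 0 ∧ pvPairOk c1 c2 (pvFeas t1 t2) = true) := by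
  rw [pvFeas]
  by_cases hok : pvPairOk c1 c2 (pvFeas t1 t2) = true
  · rw [if_pos hok]
    rw [PySem.Set.mem_add, PySem.Set.mem_update, PySem.Set.mem_update, PySem.Set.empty_eq]
    simp only [List.not_mem_nil, false_or, hok, and_true]
    rw [pv_mem_posPart, pv_mem_negPart, or_assoc]
  · rw [if_neg hok]
    rw [PySem.Set.mem_update, PySem.Set.mem_update, PySem.Set.empty_eq]
    simp only [List.not_mem_nil, false_or]
    rw [pv_mem_posPart, pv_mem_negPart]
    constructor
    · exact fun h => h.imp id Or.inl
    · rintro (h | h | ⟨-, hp⟩)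
      · exact Or.inl h
      · exact Or.inr h
      · exact absurd hp hok

theorem pv_posts_nonneg (l : List (List (List Char))) (r : List (Char ⊕ PySem.Set Int))
    (h : List.Forall₂ CellRel l r) : 0 ≤ (l.map pvPostVal).sum := by
  induction h with
  | nil => simp
  | cons hrel _ ih =>
    simp only [List.map_cons, List.sum_cons]
    have := (pv_cell_cap _ _ hrel).1
    omega

theorem pv_feas_bound (r1 r2 : List (Char ⊕ PySem.Set Int)) (l1 l2 : List (List (List Char)))
    (h1 : List.Forall₂ CellRel l1 r1) (h2 : List.Forall₂ CellRel l2 r2) (x : Int)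
    (hx : x ∈ pvFeas r1 r2) :
    -((l1.map pvPostVal).sum) ≤ x ∧ x ≤ (l2.map pvPostVal).sum := by
  match r1, r2, h1, h2 with
  | [], [], List.Forall₂.nil, List.Forall₂.nil =>
    rw [pv_mem_feas_nil_nil] at hx
    simp [hx]
  | [], c2 :: t2, List.Forall₂.nil, List.Forall₂.cons hla h2t =>
    rw [pv_mem_feas_nil_cons] at hx
    obtain ⟨b, hb, t, ht, rfl, hpos⟩ := hx
    have ih := pv_feas_bound [] t2 [] _ List.Forall₂.nil h2t t ht
    have hcap := pv_cell_cap _ _ hla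
    simp only [List.map_nil, List.sum_nil, List.map_cons, List.sum_cons] at ih ⊢
    have := hcap.2 b hb
    omega
  | c1 :: t1, [], List.Forall₂.cons hla h1t, List.Forall₂.nil =>
    rw [pv_mem_feas_cons_nil] at hx
    obtain ⟨a, ha, t, ht, rfl, hneg⟩ := hx
    have ih := pv_feas_bound t1 [] _ [] h1t List.Forall₂.nil t ht
    have hcap := pv_cell_cap _ _ hla
    simp only [List.map_nil, List.sum_nil, List.map_cons, List.sum_cons] at ih ⊢
    have := hcap.2 a ha
    omega
  | c1 :: t1, c2 :: t2, List.Forall₂.cons hla1 h1t, List.Forall₂.cons hla2 h2t =>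
    rw [pv_mem_feas_cons_cons] at hx
    have hn1 := pv_posts_nonneg _ _ h1t
    have hn2 := pv_posts_nonneg _ _ h2t
    have hc1 := pv_cell_cap _ _ hla1
    have hc2 := pv_cell_cap _ _ hla2
    simp only [List.map_cons, List.sum_cons]
    rcases hx with ⟨b, hb, t, ht, rfl, hpos⟩ | ⟨a, ha, t, ht, rfl, hneg⟩ | ⟨rfl, -⟩
    · have ih := pv_feas_bound (c1 :: t1) t2 _ _ (List.Forall₂.cons hla1 h1t) h2t t ht
      simp only [List.map_cons, List.sum_cons] at ih
      have := hc2.2 b hb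
      have := hc1.1
      omega
    · have ih := pv_feas_bound t1 (c2 :: t2) _ _ h1t (List.Forall₂.cons hla2 h2t) t ht
      simp only [List.map_cons, List.sum_cons] at ih
      have := hc1.2 a ha
      have := hc2.1
      omega
    · have := hc1.1
      have := hc2.1
      omega
  termination_by r1.length + r2.length
  decreasing_by all_goals (simp; try omega)

-- the generalised form of pvPairOk used to compare the two pair-step loops
def pvPairOkF (c1 c2 : Char ⊕ PySem.Set Int) (F : Int → Bool) : Bool :=
  match c1, c2 with
  | Sum.inr v1, Sum.inr v2 => (v1 : List Int).any (fun a => (v2 : List Int).any (fun b => F (a - b)))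
  | Sum.inr v1, Sum.inl _ => (v1 : List Int).any (fun a => F (a - 1))
  | Sum.inl _, Sum.inr v2 => (v2 : List Int).any (fun b => F (1 - b))
  | Sum.inl a, Sum.inl b => a == b && F 0

theorem pv_pairOkF_spec (c1 c2 : Char ⊕ PySem.Set Int) (later : PySem.Set Int) :
    pvPairOk c1 c2 later = pvPairOkF c1 c2 (fun d => later.contains d) := by
  cases c1 <;> cases c2 <;> rfl

theorem pv_strIsdigit_single (c : Char) : PySem.Chars.strIsdigit [c] = PySem.Chars.isdigit c := by
  simp [PySem.Chars.strIsdigit]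

theorem pv_cellrel_digit {W : Int} {vs : List Int} (hb : ∀ v ∈ W :: vs, 0 ≤ v ∧ v ≤ W)
    (hW : W ≤ 999) {v : Int} (hv : v ∈ W :: vs) :
    PySem.Chars.strIsdigit (PySem.Int.toChars v) = true ∧ pvInt (PySem.Int.toChars v) = v := by
  obtain ⟨h0, hle⟩ := hb v hv
  obtain ⟨hd, hof⟩ := pv_roundtrip v h0 (by omega)
  exact ⟨hd, by rw [pvInt, hof]; rfl⟩

theorem pv_any_step (la : List (List Char)) (cb : Char ⊕ PySem.Set Int) (h : CellRel la cb)
    (F : Int → Bool) :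
    (la.any fun w => (PySem.Chars.strIsdigit w && F (pvInt w))
        || (!PySem.Chars.strIsdigit w && F 1))
      = (pvSteps cb).any (fun b => F b) := by
  rcases h with ⟨c, hc, rfl, rfl⟩ | ⟨W, vs, S, rfl, rfl, hb, hW, hmem⟩
  · simp [pvSteps, pv_strIsdigit_single, hc]
  · rw [Bool.eq_iff_iff, List.any_eq_true, List.any_eq_true]
    simp only [List.mem_map, pvSteps]
    constructor
    · rintro ⟨w, ⟨v, hv, rfl⟩, hw⟩
      obtain ⟨hd, he⟩ := pv_cellrel_digit hb hW hv
      rw [hd, he] at hw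
      simp only [Bool.true_and, Bool.not_true, Bool.false_and, Bool.or_false] at hw
      exact ⟨v, (hmem v).mpr hv, hw⟩
    · rintro ⟨v, hv, hF⟩
      have hv' := (hmem v).mp hv
      obtain ⟨hd, he⟩ := pv_cellrel_digit hb hW hv'
      refine ⟨PySem.Int.toChars v, ⟨v, hv', rfl⟩, ?_⟩
      rw [hd, he]
      simp [hF]

theorem pv_pair_eq (la1 la2 : List (List Char)) (cb1 cb2 : Char ⊕ PySem.Set Int)
    (h1 : CellRel la1 cb1) (h2 : CellRel la2 cb2) (F : Int → Bool) :
    (la1.any fun a => la2.any fun b =>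
        if PySem.Chars.strIsdigit a && PySem.Chars.strIsdigit b then F (pvInt a - pvInt b)
        else if !PySem.Chars.strIsdigit a && !PySem.Chars.strIsdigit b then a == b && F 0
        else if PySem.Chars.strIsdigit a && !PySem.Chars.strIsdigit b then F (pvInt a - 1)
        else F (1 - pvInt b))
      = pvPairOkF cb1 cb2 F := by
  rcases h1 with ⟨c1, hc1, rfl, rfl⟩ | ⟨W1, vs1, S1, rfl, rfl, hb1, hW1, hmem1⟩ <;>
    rcases h2 with ⟨c2, hc2, rfl, rfl⟩ | ⟨W2, vs2, S2, rfl, rfl, hb2, hW2, hmem2⟩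
  · -- letter / letter
    simp [pvPairOkF, pv_strIsdigit_single, hc1, hc2]
  · -- letter / run
    rw [Bool.eq_iff_iff]
    simp only [pvPairOkF, List.any_eq_true, List.mem_map, List.mem_singleton]
    constructor
    · rintro ⟨a, rfl, w, ⟨v, hv, rfl⟩, hw⟩
      obtain ⟨hd, he⟩ := pv_cellrel_digit hb2 hW2 hv
      rw [pv_strIsdigit_single, hc1, hd, he] at hw
      simp only [Bool.false_and, Bool.not_false, Bool.not_true, Bool.and_false] at hw
      exact ⟨v, (hmem2 v).mpr hv, hw⟩
    · rintro ⟨b, hbS, hF⟩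
      have hv' := (hmem2 b).mp hbS
      obtain ⟨hd, he⟩ := pv_cellrel_digit hb2 hW2 hv'
      refine ⟨[c1], rfl, PySem.Int.toChars b, ⟨b, hv', rfl⟩, ?_⟩
      rw [pv_strIsdigit_single, hc1, hd, he]
      simpa using hF
  · -- run / letter
    rw [Bool.eq_iff_iff]
    simp only [pvPairOkF, List.any_eq_true, List.mem_map, List.mem_singleton]
    constructor
    · rintro ⟨w, ⟨v, hv, rfl⟩, b, rfl, hw⟩
      obtain ⟨hd, he⟩ := pv_cellrel_digit hb1 hW1 hv
      rw [pv_strIsdigit_single, hc2, hd, he] at hw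
      simp only [Bool.and_false, Bool.not_true, Bool.not_false, Bool.and_true] at hw
      exact ⟨v, (hmem1 v).mpr hv, hw⟩
    · rintro ⟨a, haS, hF⟩
      have hv' := (hmem1 a).mp haS
      obtain ⟨hd, he⟩ := pv_cellrel_digit hb1 hW1 hv'
      refine ⟨PySem.Int.toChars a, ⟨a, hv', rfl⟩, [c2], rfl, ?_⟩
      rw [pv_strIsdigit_single, hc2, hd, he]
      simpa using hF
  · -- run / run
    rw [Bool.eq_iff_iff]
    simp only [pvPairOkF, List.any_eq_true, List.mem_map]
    constructor
    · rintro ⟨w, ⟨v, hv, rfl⟩, w', ⟨u, hu, rfl⟩, hw⟩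
      obtain ⟨hd1, he1⟩ := pv_cellrel_digit hb1 hW1 hv
      obtain ⟨hd2, he2⟩ := pv_cellrel_digit hb2 hW2 hu
      rw [hd1, hd2, he1, he2] at hw
      simp only [Bool.and_self, if_true, Bool.true_and] at hw
      exact ⟨v, (hmem1 v).mpr hv, u, (hmem2 u).mpr hu, hw⟩
    · rintro ⟨a, haS, b, hbS, hF⟩
      have hva := (hmem1 a).mp haS
      have hvb := (hmem2 b).mp hbS
      obtain ⟨hd1, he1⟩ := pv_cellrel_digit hb1 hW1 hva
      obtain ⟨hd2, he2⟩ := pv_cellrel_digit hb2 hW2 hvb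
      refine ⟨PySem.Int.toChars a, ⟨a, hva, rfl⟩, PySem.Int.toChars b, ⟨b, hvb, rfl⟩, ?_⟩
      rw [hd1, hd2, he1, he2]
      simpa using hF

theorem pv_main (l1 l2 : List (List (List Char))) (r1 r2 : List (Char ⊕ PySem.Set Int))
    (h1 : List.Forall₂ CellRel l1 r1) (h2 : List.Forall₂ CellRel l2 r2) :
    ∀ (fuel i j : Nat) (x : Int), i ≤ l1.length → j ≤ l2.length →
      l1.length - i + (l2.length - j) < fuel →
      pvDfsA l1 l2 (pvAccum (pvPost l1)) (pvAccum (pvPost l2)) l1.length l2.length fuel i j x =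
        (pvFeas (r1.drop i) (r2.drop j)).contains x := by
  have hL1 : l1.length = r1.length := h1.length_eq
  have hL2 : l2.length = r2.length := h2.length_eq
  intro fuel
  induction fuel with
  | zero => intro i j x hi hj hf; omega
  | succ fuel ih =>
    intro i j x hi hj hf
    rw [pvDfsA]
    by_cases hp2 : (pvAccum (pvPost l2)).getLast?.getD 0 - (pvAccum (pvPost l2)).getD j 0 < x
    · rw [if_pos hp2]
      symm
      rw [Bool.eq_false_iff]
      intro hc
      rw [PySem.Set.contains_iff] at hc
      have hb := pv_feas_bound _ _ (l1.drop i) (l2.drop j)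
        (List.forall₂_drop i h1) (List.forall₂_drop j h2) x hc
      rw [pv_accum_getD (pvPost l2) j (by simpa [pvPost] using hj)] at hp2
      rw [show (pvPost l2).drop j = (l2.drop j).map pvPostVal by simp [pvPost, List.map_drop]]
        at hp2
      omega
    · rw [if_neg hp2]
      by_cases hp1 : (pvAccum (pvPost l1)).getLast?.getD 0 - (pvAccum (pvPost l1)).getD i 0 < -x
      · rw [if_pos hp1]
        symm
        rw [Bool.eq_false_iff]
        intro hc
        rw [PySem.Set.contains_iff] at hc
        have hb := pv_feas_bound _ _ (l1.drop i) (l2.drop j)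
          (List.forall₂_drop i h1) (List.forall₂_drop j h2) x hc
        rw [pv_accum_getD (pvPost l1) i (by simpa [pvPost] using hi)] at hp1
        rw [show (pvPost l1).drop i = (l1.drop i).map pvPostVal by simp [pvPost, List.map_drop]]
          at hp1
        omega
      · rw [if_neg hp1]
        by_cases hx0 : x = 0
        · rw [if_pos hx0]
          subst hx0
          by_cases him : i = l1.length <;> by_cases hjn : j = l2.length
          · rw [if_pos ⟨him, hjn⟩]
            have hd1 : r1.drop i = [] := List.drop_eq_nil_of_le (by omega)
            have hd2 : r2.drop j = [] := List.drop_eq_nil_of_le (by omega)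
            rw [hd1, hd2]
            symm
            rw [PySem.Set.contains_iff, pv_mem_feas_nil_nil]
          · rw [if_neg (by tauto), if_pos (Or.inl him)]
            have hd1 : r1.drop i = [] := List.drop_eq_nil_of_le (by omega)
            have hd2 : r2.drop j = r2[j]'(by omega) :: r2.drop (j+1) :=
              List.drop_eq_getElem_cons (by omega)
            symm
            rw [Bool.eq_false_iff]
            intro hc
            rw [PySem.Set.contains_iff, hd1, hd2, pv_mem_feas_nil_cons] at hc
            obtain ⟨b, -, t, -, -, hpos⟩ := hc
            omega
          · rw [if_neg (by tauto), if_pos (Or.inr hjn)]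
            have hd1 : r1.drop i = r1[i]'(by omega) :: r1.drop (i+1) :=
              List.drop_eq_getElem_cons (by omega)
            have hd2 : r2.drop j = [] := List.drop_eq_nil_of_le (by omega)
            symm
            rw [Bool.eq_false_iff]
            intro hc
            rw [PySem.Set.contains_iff, hd1, hd2, pv_mem_feas_cons_nil] at hc
            obtain ⟨a, -, t, -, -, hneg⟩ := hc
            omega
          · rw [if_neg (by tauto), if_neg (by tauto)]
            have hi' : i < l1.length := by omega
            have hj' : j < l2.length := by omega
            have hd1 : r1.drop i = r1[i]'(by omega) :: r1.drop (i+1) :=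
              List.drop_eq_getElem_cons (by omega)
            have hd2 : r2.drop j = r2[j]'(by omega) :: r2.drop (j+1) :=
              List.drop_eq_getElem_cons (by omega)
            have hrel1 : CellRel (l1[i]'hi') (r1[i]'(by omega)) := by
              have := h1.get hi' (by omega)
              simpa using this
            have hrel2 : CellRel (l2[j]'hj') (r2[j]'(by omega)) := by
              have := h2.get hj' (by omega)
              simpa using this
            rw [List.getD_eq_getElem _ _ hi', List.getD_eq_getElem _ _ hj']
            have hpair := pv_pair_eq _ _ _ _ hrel1 hrel2
              (fun d => pvDfsA l1 l2 (pvAccum (pvPost l1)) (pvAccum (pvPost l2))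
                l1.length l2.length fuel (i+1) (j+1) d)
            simp only at hpair
            rw [hpair]
            have hF : (fun d => pvDfsA l1 l2 (pvAccum (pvPost l1)) (pvAccum (pvPost l2))
                l1.length l2.length fuel (i+1) (j+1) d)
                = (fun d => (pvFeas (r1.drop (i+1)) (r2.drop (j+1))).contains d) :=
              funext (fun d => ih (i+1) (j+1) d (by omega) (by omega) (by omega))
            rw [hF, ← pv_pairOkF_spec]
            rw [hd1, hd2, Bool.eq_iff_iff, PySem.Set.contains_iff, pv_mem_feas_cons_cons]
            simp
        · rw [if_neg hx0]
          by_cases hxpos : 0 < x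
          · rw [if_pos hxpos]
            by_cases hjn : j = l2.length
            · rw [if_pos hjn]
              have hd2 : r2.drop j = [] := List.drop_eq_nil_of_le (by omega)
              symm
              rw [Bool.eq_false_iff]
              intro hc
              rw [PySem.Set.contains_iff, hd2] at hc
              rcases hdrop : r1.drop i with _ | ⟨c1', t1'⟩ <;> rw [hdrop] at hc
              · rw [pv_mem_feas_nil_nil] at hc; omega
              · rw [pv_mem_feas_cons_nil] at hc
                obtain ⟨a, -, t, -, -, hneg⟩ := hc
                omega
            · rw [if_neg hjn]
              have hj' : j < l2.length := by omega
              have hd2 : r2.drop j = r2[j]'(by omega) :: r2.drop (j+1) :=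
                List.drop_eq_getElem_cons (by omega)
              have hrel2 : CellRel (l2[j]'hj') (r2[j]'(by omega)) := by
                have := h2.get hj' (by omega)
                simpa using this
              rw [List.getD_eq_getElem _ _ hj']
              have hstep := pv_any_step _ _ hrel2
                (fun v => pvDfsA l1 l2 (pvAccum (pvPost l1)) (pvAccum (pvPost l2))
                  l1.length l2.length fuel i (j+1) (x - v))
              simp only at hstep
              rw [show (x : Int) - 1 = x - 1 from rfl] at hstep
              rw [hstep, hd2, Bool.eq_iff_iff, List.any_eq_true, PySem.Set.contains_iff]
              have ihIff : ∀ y : Int,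
                  (pvDfsA l1 l2 (pvAccum (pvPost l1)) (pvAccum (pvPost l2)) l1.length l2.length
                    fuel i (j+1) y = true) ↔ y ∈ pvFeas (r1.drop i) (r2.drop (j+1)) := by
                intro y
                rw [ih i (j+1) y (by omega) (by omega) (by omega), PySem.Set.contains_iff]
              have hmem : ∀ z : Int, 0 < z →
                  (z ∈ pvFeas (r1.drop i) (r2[j]'(by omega) :: r2.drop (j+1)) ↔
                  ∃ b ∈ pvSteps (r2[j]'(by omega)), ∃ t ∈ pvFeas (r1.drop i) (r2.drop (j+1)),
                    z = b + t ∧ 0 < z) := by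
                intro z hz
                rcases hdrop : r1.drop i with _ | ⟨c1', t1'⟩
                · rw [pv_mem_feas_nil_cons]
                · rw [pv_mem_feas_cons_cons]
                  constructor
                  · rintro (h | ⟨a, -, t, -, rfl, hneg⟩ | ⟨rfl, -⟩)
                    · exact h
                    · omega
                    · omega
                  · exact Or.inl
              rw [hmem x hxpos]
              constructor
              · rintro ⟨b, hbmem, hdfs⟩
                exact ⟨b, hbmem, x - b, (ihIff (x - b)).mp hdfs, by ring, hxpos⟩
              · rintro ⟨b, hbmem, t, ht, rfl, -⟩
                exact ⟨b, hbmem, (ihIff (b + t - b)).mpr (by simpa using ht)⟩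
          · rw [if_neg hxpos]
            by_cases him : i = l1.length
            · rw [if_pos him]
              have hd1 : r1.drop i = [] := List.drop_eq_nil_of_le (by omega)
              symm
              rw [Bool.eq_false_iff]
              intro hc
              rw [PySem.Set.contains_iff, hd1] at hc
              rcases hdrop : r2.drop j with _ | ⟨c2', t2'⟩ <;> rw [hdrop] at hc
              · rw [pv_mem_feas_nil_nil] at hc; omega
              · rw [pv_mem_feas_nil_cons] at hc
                obtain ⟨b, -, t, -, -, hpos⟩ := hc
                omega
            · rw [if_neg him]
              have hi' : i < l1.length := by omega
              have hd1 : r1.drop i = r1[i]'(by omega) :: r1.drop (i+1) :=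
                List.drop_eq_getElem_cons (by omega)
              have hrel1 : CellRel (l1[i]'hi') (r1[i]'(by omega)) := by
                have := h1.get hi' (by omega)
                simpa using this
              rw [List.getD_eq_getElem _ _ hi']
              have hstep := pv_any_step _ _ hrel1
                (fun v => pvDfsA l1 l2 (pvAccum (pvPost l1)) (pvAccum (pvPost l2))
                  l1.length l2.length fuel (i+1) j (x + v))
              simp only at hstep
              rw [hstep, hd1, Bool.eq_iff_iff, List.any_eq_true, PySem.Set.contains_iff]
              have ihIff : ∀ y : Int,
                  (pvDfsA l1 l2 (pvAccum (pvPost l1)) (pvAccum (pvPost l2)) l1.length l2.length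
                    fuel (i+1) j y = true) ↔ y ∈ pvFeas (r1.drop (i+1)) (r2.drop j) := by
                intro y
                rw [ih (i+1) j y (by omega) (by omega) (by omega), PySem.Set.contains_iff]
              have hxneg : x < 0 := by omega
              have hmem : ∀ z : Int, z < 0 →
                  ((z ∈ pvFeas (r1[i]'(by omega) :: r1.drop (i+1)) (r2.drop j)) ↔
                  ∃ a ∈ pvSteps (r1[i]'(by omega)), ∃ t ∈ pvFeas (r1.drop (i+1)) (r2.drop j),
                    z = t - a) := by
                intro z hz
                rcases hdrop : r2.drop j with _ | ⟨c2', t2'⟩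
                · rw [pv_mem_feas_cons_nil]
                  constructor
                  · rintro ⟨a, ha, t, ht, rfl, -⟩; exact ⟨a, ha, t, ht, rfl⟩
                  · rintro ⟨a, ha, t, ht, rfl⟩; exact ⟨a, ha, t, ht, rfl, hz⟩
                · rw [pv_mem_feas_cons_cons]
                  constructor
                  · rintro (⟨b, -, t, -, rfl, hpos⟩ | ⟨a, ha, t, ht, rfl, -⟩ | ⟨rfl, -⟩)
                    · omega
                    · exact ⟨a, ha, t, ht, rfl⟩
                    · omega
                  · rintro ⟨a, ha, t, ht, rfl⟩
                    exact Or.inr (Or.inl ⟨a, ha, t, ht, rfl, hz⟩)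
              rw [hmem x hxneg]
              constructor
              · rintro ⟨a, hamem, hdfs⟩
                exact ⟨a, hamem, x + a, (ihIff (x + a)).mp hdfs, by ring⟩
              · rintro ⟨a, hamem, t, ht, rfl⟩
                exact ⟨a, hamem, (ihIff (t - a + a)).mpr (by simpa using ht)⟩

-- ===== VERDICT (by name: the statement is the Claim_ definition above) =====
theorem lc_2060_spec : Claim_equal_lc_2060 := by
  intro s1 s2 _hdom hpre
  unfold Spec_lc_2060 lc_2060 lc_2060_alt
  have h1 := pv_parse_rel s1.toList hpre.1
  have h2 := pv_parse_rel s2.toList hpre.2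
  have := pv_main _ _ _ _ h1 h2
    ((pvDepartCells s1.toList).length + (pvDepartCells s2.toList).length + 1) 0 0 0
    (by omega) (by omega) (by omega)
  simpa using this
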